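-- pv_equiv track=rewrite | github.com/daveisagit/aoc2022 | tools/grid.py | straight_path_of_points_between
-- ===== SOURCE A (Python) =====
-- from collections import namedtuple
--
-- Point = namedtuple(
--     "P", ["x", "y"]
-- )
--
-- def cmp_scalar(a, b):
--     return (a > b) - (a < b)
--
-- def make_point(t: tuple) -> Point:
--     return Point(t[0], t[1])
--
-- def straight_path_of_points_between(a: Point, b: Point):
--     """Generate a list of points between 2 points that vertical/horizontally aligned"""
--     # diff = tuple([x[0]-x[1] for x in zip(a, b)])
--     if not isinstance(a, Point):
--         a = make_point(a)
--     if not isinstance(b, Point):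
--         b = make_point(b)
--
--     if a.x == b.x and a.y == b.y:
--         yield a
--
--     elif a.x == b.x:
--         dy = 0 - cmp_scalar(a.y, b.y)
--         for i in range(a.y, b.y + dy, dy):
--             yield Point(x=a.x, y=i)
--
--     elif a.y == b.y:
--         dx = 0 - cmp_scalar(a.x, b.x)
--         for i in range(a.x, b.x + dx, dx):
--             yield Point(x=i, y=a.y)
--
--     else:
--         raise ValueError(f"Points {a},{b} are not aligned")
-- ===== SOURCE B (Python) =====
-- from collections import namedtuple
--
-- Point = namedtuple("P", ["x", "y"])
--
-- def cmp_scalar(a, b):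
--     return (a > b) - (a < b)
--
-- def make_point(t: tuple) -> Point:
--     return Point(t[0], t[1])
--
-- def straight_path_of_points_between(a, b):
--     """Step-driven single loop: one sign per axis, n+1 steps from a toward b."""
--     if not isinstance(a, Point):
--         a = make_point(a)
--     if not isinstance(b, Point):
--         b = make_point(b)
--     sx = cmp_scalar(b.x, a.x)
--     sy = cmp_scalar(b.y, a.y)
--     if sx and sy:
--         raise ValueError(f"Points {a},{b} are not aligned")
--     n = max(abs(b.x - a.x), abs(b.y - a.y))
--     for i in range(n + 1):
--         yield Point(a.x + i * sx, a.y + i * sy)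
-- ===== Notes on version B (the rewrite author's own statement) =====
-- stated objective: simpler
-- what changed: A's three-way branch (equal points / vertical with its own range / horizontal with its own range) is replaced by one step-driven loop: a sign per axis and n+1 uniform steps from a toward b; the non-aligned ValueError (same message) is checked up front via the two signs.
import Mathlib
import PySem

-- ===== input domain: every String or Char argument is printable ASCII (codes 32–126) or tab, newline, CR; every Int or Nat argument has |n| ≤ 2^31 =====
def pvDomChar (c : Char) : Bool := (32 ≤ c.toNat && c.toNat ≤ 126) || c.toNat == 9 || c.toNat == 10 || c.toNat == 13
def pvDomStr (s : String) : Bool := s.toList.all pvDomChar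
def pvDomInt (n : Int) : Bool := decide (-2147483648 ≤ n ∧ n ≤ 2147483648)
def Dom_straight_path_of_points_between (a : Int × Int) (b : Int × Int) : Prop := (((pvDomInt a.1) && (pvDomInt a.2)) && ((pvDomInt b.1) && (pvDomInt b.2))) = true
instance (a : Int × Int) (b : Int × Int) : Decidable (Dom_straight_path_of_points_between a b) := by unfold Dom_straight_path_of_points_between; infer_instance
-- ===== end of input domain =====

-- B replaces A's three-way branch (equal / vertical / horizontal, each with its own
-- range) by one step-driven loop: a sign per axis and n+1 uniform steps (objective: simpler).

-- ===== PORT A =====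
-- cmp_scalar(a, b) = (a > b) - (a < b)
def cmpScalar (x y : Int) : Int :=
  (if x > y then (1 : Int) else 0) - (if x < y then (1 : Int) else 0)

def straight_path_of_points_between (a : Int × Int) (b : Int × Int) : List (Int × Int) :=
  if a.1 = b.1 ∧ a.2 = b.2 then [a]
  else if a.1 = b.1 then
    let dy := 0 - cmpScalar a.2 b.2
    (PySem.List.pyRange a.2 (b.2 + dy) dy).map (fun i => (a.1, i))
  else if a.2 = b.2 then
    let dx := 0 - cmpScalar a.1 b.1
    (PySem.List.pyRange a.1 (b.1 + dx) dx).map (fun i => (i, a.2))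
  else []  -- Python raises ValueError here; excluded by Pre_

-- ===== PORT B =====
def straight_path_of_points_between_alt (a : Int × Int) (b : Int × Int) : List (Int × Int) :=
  let sx := cmpScalar b.1 a.1
  let sy := cmpScalar b.2 a.2
  if sx ≠ 0 ∧ sy ≠ 0 then []  -- Python raises ValueError here; excluded by Pre_
  else
    let n := max (b.1 - a.1).natAbs (b.2 - a.2).natAbs
    (PySem.List.pyRange 0 ((n : Int) + 1) 1).map (fun i => (a.1 + i * sx, a.2 + i * sy))

-- ===== PRECONDITION & SPEC =====
-- Pre_ excludes exactly the non-aligned inputs, on which the Python A raises ValueError.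
def Pre_straight_path_of_points_between (a : Int × Int) (b : Int × Int) : Prop :=
  a.1 = b.1 ∨ a.2 = b.2
instance (a : Int × Int) (b : Int × Int) : Decidable (Pre_straight_path_of_points_between a b) := by
  unfold Pre_straight_path_of_points_between; infer_instance

def pvWitness_straight_path_of_points_between : (Int × Int) × (Int × Int) := ((2, 5), (2, 1))

def Spec_straight_path_of_points_between (a : Int × Int) (b : Int × Int) (out : List (Int × Int)) : Prop := out = straight_path_of_points_between_alt a b
instance (a : Int × Int) (b : Int × Int) (out : List (Int × Int)) : Decidable (Spec_straight_path_of_points_between a b out) := by unfold Spec_straight_path_of_points_between; infer_instance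

-- ===== CLAIM (what is proved, stated in full; the proofs are below) =====
def Claim_equal_straight_path_of_points_between : Prop := ∀ (a : Int × Int) (b : Int × Int), Dom_straight_path_of_points_between a b → Pre_straight_path_of_points_between a b → Spec_straight_path_of_points_between a b (straight_path_of_points_between a b)

-- ===== LEMMAS AND PROOFS =====

theorem cmp_self (x : Int) : cmpScalar x x = 0 := by simp [cmpScalar]

theorem cmp_of_lt {x y : Int} (h : x < y) : cmpScalar x y = -1 := by
  simp [cmpScalar, h, lt_asymm h]

theorem cmp_of_gt {x y : Int} (h : y < x) : cmpScalar x y = 1 := by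
  simp [cmpScalar, h, lt_asymm h]

-- range(s, t+1, 1) is the shift by s of range(0, (t-s)+1, 1)
theorem shift_pos (s t : Int) (h : s ≤ t) :
    PySem.List.pyRange s (t + 1) 1
      = (PySem.List.pyRange 0 ((t - s) + 1) 1).map (fun i => s + i) := by
  rw [PySem.List.pyRange_one, PySem.List.pyRange_one, List.map_map]
  have e : (t + 1 - s).toNat = ((t - s) + 1 - 0).toNat := by omega
  rw [e]
  exact List.map_congr_left (fun k _ => by simp)

-- range(s, t-1, -1) is the reflection at s of range(0, (s-t)+1, 1)
theorem shift_neg (s t : Int) (h : t ≤ s) :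
    PySem.List.pyRange s (t - 1) (-1)
      = (PySem.List.pyRange 0 ((s - t) + 1) 1).map (fun i => s - i) := by
  rw [PySem.List.pyRange_neg_one, PySem.List.pyRange_one, List.map_map]
  have e : (s - (t - 1)).toNat = ((s - t) + 1 - 0).toNat := by omega
  rw [e]
  exact List.map_congr_left (fun k _ => by simp)

-- ===== VERDICT (by name: the statement is the Claim_ definition above) =====
theorem straight_path_of_points_between_spec : Claim_equal_straight_path_of_points_between := by
  intro a b _ hpre
  unfold Spec_straight_path_of_points_between
  obtain ⟨ax, ay⟩ := a
  obtain ⟨bx, by'⟩ := b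
  simp only [straight_path_of_points_between, straight_path_of_points_between_alt]
  rcases hpre with h | h <;> simp only at h
  · -- vertical: ax = bx
    subst h
    rcases lt_trichotomy ay by' with hy | hy | hy
    · simp only [cmp_self, cmp_of_lt hy, cmp_of_gt hy]
      have hcast : ((max (ax - ax).natAbs (by' - ay).natAbs : Nat) : Int) = by' - ay := by
        rw [Nat.cast_max]; omega
      rw [hcast]
      norm_num [hy.ne]
      rw [shift_pos ay by' hy.le, List.map_map]
      exact List.map_congr_left (fun k _ => rfl)
    · subst hy
      simp only [cmp_self]
      norm_num [PySem.List.pyRange_one]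
    · simp only [cmp_self, cmp_of_lt hy, cmp_of_gt hy]
      have hcast : ((max (ax - ax).natAbs (by' - ay).natAbs : Nat) : Int) = ay - by' := by
        rw [Nat.cast_max]; omega
      rw [hcast]
      norm_num [hy.ne']
      rw [show by' + -1 = by' - 1 by ring, shift_neg ay by' hy.le, List.map_map]
      exact List.map_congr_left (fun k _ => by simp [sub_eq_add_neg])
  · -- horizontal: ay = by'
    subst h
    rcases lt_trichotomy ax bx with hx | hx | hx
    · simp only [cmp_self, cmp_of_lt hx, cmp_of_gt hx]
      have hcast : ((max (bx - ax).natAbs (ay - ay).natAbs : Nat) : Int) = bx - ax := by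
        rw [Nat.cast_max]; omega
      rw [hcast]
      norm_num [hx.ne]
      rw [shift_pos ax bx hx.le, List.map_map]
      exact List.map_congr_left (fun k _ => rfl)
    · subst hx
      simp only [cmp_self]
      norm_num [PySem.List.pyRange_one]
    · simp only [cmp_self, cmp_of_lt hx, cmp_of_gt hx]
      have hcast : ((max (bx - ax).natAbs (ay - ay).natAbs : Nat) : Int) = ax - bx := by
        rw [Nat.cast_max]; omega
      rw [hcast]
      norm_num [hx.ne']
      rw [show bx + -1 = bx - 1 by ring, shift_neg ax bx hx.le, List.map_map]
      exact List.map_congr_left (fun k _ => by simp [sub_eq_add_neg])
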